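-- pv_equiv track=rewrite | github.com/OriC28/temporal | Python/Práctica/functions/upper.py | upper_function
-- ===== SOURCE A (Python) =====
-- def upper_function(string):
-- 	new_string = ""
-- 	letters_lower = "abcdefghijklmnñopqrstuvwxyz"
-- 	letters_upper = "ABCDEFGHIJKLMNÑOPQRSTUVWXYZ"
-- 	for i in range(len(string)):
-- 		if string[i] in letters_lower:
-- 			new_string+=letters_upper[letters_lower.find(string[i])]
-- 		else:
-- 			new_string+=string[i]
--
-- 	return new_string
-- ===== SOURCE B (Python) =====
-- def upper_function(string):
--     chars = []
--     for c in string: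
--         if 'a' <= c <= 'z':
--             chars.append(chr(ord(c) - 32))
--         elif c == 'ñ':
--             chars.append('Ñ')
--         else:
--             chars.append(c)
--     return ''.join(chars)
-- ===== Notes on version B (the rewrite author's own statement) =====
-- stated objective: alternative
-- what changed: Drops both alphabet tables: B uppercases by codepoint arithmetic (chr(ord(c)-32) for the contiguous a-z range, one special case for ñ) into a list joined once, instead of A's per-character membership test and .find scan over a 27-letter alphabet string with string concatenation.
import Mathlib
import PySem

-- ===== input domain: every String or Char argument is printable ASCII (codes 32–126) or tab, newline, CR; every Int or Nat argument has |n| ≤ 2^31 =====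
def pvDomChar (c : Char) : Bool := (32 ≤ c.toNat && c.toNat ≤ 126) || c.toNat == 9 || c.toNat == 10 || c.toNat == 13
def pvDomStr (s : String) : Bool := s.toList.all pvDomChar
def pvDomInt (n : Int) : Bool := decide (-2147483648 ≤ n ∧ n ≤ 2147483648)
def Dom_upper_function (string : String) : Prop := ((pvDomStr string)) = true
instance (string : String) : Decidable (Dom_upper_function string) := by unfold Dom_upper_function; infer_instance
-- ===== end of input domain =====

-- B drops A's alphabet tables and membership/.find scan: it uppercases by codepoint
-- arithmetic on the contiguous a-z range with one special case for ñ (alternative).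

-- the Python string constants "abcdefghijklmnñopqrstuvwxyz" / "ABCDEFGHIJKLMNÑOPQRSTUVWXYZ"
def pvLower : List Char :=
  ['a','b','c','d','e','f','g','h','i','j','k','l','m','n','ñ','o','p','q','r','s','t','u','v','w','x','y','z']
def pvUpper : List Char :=
  ['A','B','C','D','E','F','G','H','I','J','K','L','M','N','Ñ','O','P','Q','R','S','T','U','V','W','X','Y','Z']

-- ===== PORT A =====
def upper_function (string : String) : String :=
  let new_string :=
    (PySem.List.pyRange 0 (PySem.Str.len string)).foldl
      (fun acc i =>
        let c := PySem.List.pyGetD string.toList i ' '   -- string[i], i always in range here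
        if PySem.Chars.isIn [c] pvLower then
          acc ++ [PySem.List.pyGetD pvUpper (PySem.Chars.find pvLower [c]) ' ']
        else
          acc ++ [c]) []
  String.ofList new_string

-- ===== PORT B =====
-- per-character step of Source B's loop body; 'a' <= c <= 'z' on one-char Python strings
-- is codepoint comparison (exact), chr(ord(c)-32) is Char.ofNat (c.toNat - 32)
def pvUpChar (c : Char) : Char :=
  if 97 ≤ c.toNat ∧ c.toNat ≤ 122 then Char.ofNat (c.toNat - 32)
  else if c = 'ñ' then 'Ñ'
  else c

def upper_function_alt (string : String) : String :=
  String.ofList (string.toList.foldl (fun chars c => chars ++ [pvUpChar c]) [])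

-- ===== PRECONDITION & SPEC =====
def Spec_upper_function (string : String) (out : String) : Prop := out = upper_function_alt string
instance (string : String) (out : String) : Decidable (Spec_upper_function string out) := by unfold Spec_upper_function; infer_instance

-- ===== CLAIM (what is proved, stated in full; the proofs are below) =====
def Claim_equal_upper_function : Prop := ∀ (string : String), Dom_upper_function string → Spec_upper_function string (upper_function string)

-- ===== LEMMAS AND PROOFS =====

-- a codepoint in 97..122 is one of the letters a..z
theorem pv_az_mem (c : Char) (h1 : 97 ≤ c.toNat) (h2 : c.toNat ≤ 122) : c ∈ pvLower := by
  have hc : c = Char.ofNat c.toNat := (Char.ofNat_toNat c).symm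
  rw [hc]
  interval_cases h : c.toNat <;> decide

-- per-character agreement of A's alphabet scan with B's arithmetic step
theorem pv_char_step (c : Char) :
    (if PySem.Chars.isIn [c] pvLower then
        PySem.List.pyGetD pvUpper (PySem.Chars.find pvLower [c]) ' '
      else c) = pvUpChar c := by
  by_cases hc : c ∈ pvLower
  · fin_cases hc <;> decide
  · have h1 : PySem.Chars.isIn [c] pvLower = false := by
      rw [PySem.Chars.isIn_eq_false_iff]
      intro h
      exact hc (h.subset (by simp))
    have hn : ¬ (97 ≤ c.toNat ∧ c.toNat ≤ 122) := by
      rintro ⟨ha, hb⟩; exact hc (pv_az_mem c ha hb)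
    have hne : c ≠ 'ñ' := by rintro rfl; exact hc (by decide)
    rw [h1]
    simp [pvUpChar, hn, hne]

theorem upper_function_spec : Claim_equal_upper_function := by
  intro s _
  show upper_function s = upper_function_alt s
  unfold upper_function upper_function_alt
  simp only [PySem.Str.len_eq]
  rw [PySem.List.foldl_pyRange_zero_pyGetD' s.toList ' '
      (f := fun acc c =>
        if PySem.Chars.isIn [c] pvLower then
          acc ++ [PySem.List.pyGetD pvUpper (PySem.Chars.find pvLower [c]) ' ']
        else acc ++ [c]) []]
  refine congrArg String.ofList ?_
  apply PySem.List.foldl_congr_mem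
  intro acc c _
  rw [← pv_char_step c]
  split <;> rfl
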